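-- pv_equiv track=rewrite | github.com/gitdrik/aoc2019 | 22.py | polypow
-- ===== SOURCE A (Python) =====
-- def polypow(a,b,unshuffles,decklength):
--     if unshuffles==0:
--         return 1,0
--     if unshuffles%2==0:
--         return polypow(a*a%decklength, (a*b+b)%decklength, unshuffles//2, decklength)
--     else:
--         c,d = polypow(a, b, unshuffles-1, decklength)
--         return a*c%decklength, (a*d+b)%decklength
-- ===== SOURCE B (Python) =====
-- def polypow(a, b, unshuffles, decklength):
--     rc, rd = 1, 0
--     ca, cb = a, b
--     n = unshuffles
--     while n > 0:
--         if n % 2 == 1: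
--             rc, rd = ca * rc % decklength, (ca * rd + cb) % decklength
--         ca, cb = ca * ca % decklength, (ca * cb + cb) % decklength
--         n //= 2
--     return rc, rd
-- ===== Notes on version B (the rewrite author's own statement) =====
-- stated objective: alternative
-- what changed: Replaces A's recursion (halve when even, peel one application when odd, composing on the way back up) by an iterative binary square-and-multiply loop that keeps an accumulator map (rc, rd) and a current map (ca, cb) and scans the bits of unshuffles low-to-high.
import Mathlib
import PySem

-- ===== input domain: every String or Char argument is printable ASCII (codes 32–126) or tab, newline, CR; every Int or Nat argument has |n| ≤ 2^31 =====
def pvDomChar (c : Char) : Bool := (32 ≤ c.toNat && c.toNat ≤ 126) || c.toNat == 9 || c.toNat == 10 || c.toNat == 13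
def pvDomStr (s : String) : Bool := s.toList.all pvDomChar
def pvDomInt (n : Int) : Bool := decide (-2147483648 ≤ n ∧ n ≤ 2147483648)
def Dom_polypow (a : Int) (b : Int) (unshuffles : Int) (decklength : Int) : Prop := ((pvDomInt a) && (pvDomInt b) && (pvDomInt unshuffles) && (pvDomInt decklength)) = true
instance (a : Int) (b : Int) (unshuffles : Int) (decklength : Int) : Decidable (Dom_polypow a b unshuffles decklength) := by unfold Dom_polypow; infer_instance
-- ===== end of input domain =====

-- B replaces A's recursion by an iterative square-and-multiply loop with an accumulator map
-- (objective: alternative decomposition of the same O(log n) modular-exponentiation task).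

-- termination helper for both ports: Python's n // 2 shrinks a positive n
theorem pvFdiv2_toNat_lt (n : Int) (h : 0 < n) : (PySem.Int.floordiv n 2).toNat < n.toNat := by
  obtain ⟨m, rfl⟩ : ∃ m : Nat, n = (m : Int) := ⟨n.toNat, (Int.toNat_of_nonneg h.le).symm⟩
  rw [show ((2 : Int)) = ((2 : Nat) : Int) by norm_num, PySem.Int.floordiv_natCast]
  simp only [Int.toNat_natCast]
  omega

-- ===== PORT A =====
def polypow (a : Int) (b : Int) (unshuffles : Int) (decklength : Int) : Int × Int :=
  if h0 : unshuffles = 0 then (1, 0)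
  else if hn : unshuffles < 0 then (1, 0)
    -- Python recurses without end for negative unshuffles (outside Pre_); totalizing guard only
  else if PySem.Int.mod unshuffles 2 = 0 then
    polypow (PySem.Int.mod (a * a) decklength) (PySem.Int.mod (a * b + b) decklength)
      (PySem.Int.floordiv unshuffles 2) decklength
  else
    let cd := polypow a b (unshuffles - 1) decklength
    (PySem.Int.mod (a * cd.1) decklength, PySem.Int.mod (a * cd.2 + b) decklength)
termination_by unshuffles.toNat
decreasing_by
  · exact pvFdiv2_toNat_lt unshuffles (by omega)
  · omega

-- ===== PORT B =====
-- the while-loop of Source B: state (rc, rd) accumulator, (ca, cb) current map, n remaining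
def polypowAltGo (rc : Int) (rd : Int) (ca : Int) (cb : Int) (n : Int) (decklength : Int) : Int × Int :=
  if h : n > 0 then
    let rc' := if PySem.Int.mod n 2 = 1 then PySem.Int.mod (ca * rc) decklength else rc
    let rd' := if PySem.Int.mod n 2 = 1 then PySem.Int.mod (ca * rd + cb) decklength else rd
    polypowAltGo rc' rd' (PySem.Int.mod (ca * ca) decklength) (PySem.Int.mod (ca * cb + cb) decklength)
      (PySem.Int.floordiv n 2) decklength
  else (rc, rd)
termination_by n.toNat
decreasing_by exact pvFdiv2_toNat_lt n h

def polypow_alt (a : Int) (b : Int) (unshuffles : Int) (decklength : Int) : Int × Int :=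
  polypowAltGo 1 0 a b unshuffles decklength

-- ===== PRECONDITION & SPEC =====
-- Pre_ excludes exactly the inputs where Python A raises: negative unshuffles (unbounded
-- recursion, RecursionError) and decklength = 0 with unshuffles > 0 (ZeroDivisionError).
def Pre_polypow (a : Int) (b : Int) (unshuffles : Int) (decklength : Int) : Prop :=
  0 ≤ unshuffles ∧ (unshuffles = 0 ∨ decklength ≠ 0)
instance (a : Int) (b : Int) (unshuffles : Int) (decklength : Int) : Decidable (Pre_polypow a b unshuffles decklength) := by unfold Pre_polypow; infer_instance

def pvWitness_polypow : Int × Int × Int × Int := (3, 5, 6, 10)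

def Spec_polypow (a : Int) (b : Int) (unshuffles : Int) (decklength : Int) (out : Int × Int) : Prop := out = polypow_alt a b unshuffles decklength
instance (a : Int) (b : Int) (unshuffles : Int) (decklength : Int) (out : Int × Int) : Decidable (Spec_polypow a b unshuffles decklength out) := by unfold Spec_polypow; infer_instance

-- ===== CLAIM (what is proved, stated in full; the proofs are below) =====
def Claim_equal_polypow : Prop := ∀ (a : Int) (b : Int) (unshuffles : Int) (decklength : Int), Dom_polypow a b unshuffles decklength → Pre_polypow a b unshuffles decklength → Spec_polypow a b unshuffles decklength (polypow a b unshuffles decklength)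


-- ===== LEMMAS AND PROOFS =====

theorem pvMod_eq (a b : Int) : PySem.Int.mod a b = Int.fmod a b := rfl

-- geometric sum Σ_{i<n} a^i, the b-coefficient of the n-fold map x ↦ a*x + b
def pvGeom (a : Int) : Nat → Int
  | 0 => 0
  | n + 1 => pvGeom a n + a ^ n

theorem pvGeom_succ' (a : Int) (n : Nat) : pvGeom a (n + 1) = 1 + a * pvGeom a n := by
  induction n with
  | zero => simp [pvGeom]
  | succ n ih =>
    calc pvGeom a (n + 1 + 1) = pvGeom a (n + 1) + a ^ (n + 1) := rfl
      _ = (1 + a * pvGeom a n) + a * a ^ n := by rw [ih]; ring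
      _ = 1 + a * (pvGeom a n + a ^ n) := by ring
      _ = 1 + a * pvGeom a (n + 1) := rfl

theorem pvGeom_two_mul (a : Int) (k : Nat) :
    pvGeom a (2 * k) = (1 + a) * pvGeom (a * a) k := by
  induction k with
  | zero => simp [pvGeom]
  | succ k ih =>
    have hp : (a * a) ^ k = a ^ (2 * k) := by rw [two_mul, pow_add, mul_pow]
    rw [show 2 * (k + 1) = 2 * k + 1 + 1 by ring,
        show pvGeom a (2 * k + 1 + 1) = pvGeom a (2 * k + 1) + a ^ (2 * k + 1) from rfl,
        show pvGeom a (2 * k + 1) = pvGeom a (2 * k) + a ^ (2 * k) from rfl, ih,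
        show pvGeom (a * a) (k + 1) = pvGeom (a * a) k + (a * a) ^ k from rfl,
        hp, pow_succ]
    ring

theorem pvFmod_congr {L x y : Int} (h : x ≡ y [ZMOD L]) : Int.fmod x L = Int.fmod y L := by
  rw [Int.fmod_eq_fmod_iff_fmod_sub_eq_zero]
  obtain ⟨c, hc⟩ := Int.ModEq.dvd h.symm
  rw [hc, mul_comm, Int.mul_fmod_left]

theorem pvFmod_modeq (x L : Int) : Int.fmod x L ≡ x [ZMOD L] :=
  Int.modEq_iff_dvd.mpr ⟨Int.fdiv x L, by have := Int.mul_fdiv_add_fmod x L; linarith⟩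

theorem pvGeom_modeq {L x y : Int} (h : x ≡ y [ZMOD L]) (n : Nat) :
    pvGeom x n ≡ pvGeom y n [ZMOD L] := by
  induction n with
  | zero => rfl
  | succ n ih => exact ih.add (h.pow n)

-- closed form of A's recursion for n ≥ 1
theorem polypow_closed (L : Int) (m : Nat) (a b : Int) (hm : 1 ≤ m) :
    polypow a b (m : Int) L = (Int.fmod (a ^ m) L, Int.fmod (b * pvGeom a m) L) := by
  induction m using Nat.strong_induction_on generalizing a b with
  | _ m ih =>
  rw [polypow]
  have hz : ¬ ((m : Int) = 0) := by exact_mod_cast Nat.one_le_iff_ne_zero.mp hm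
  have hneg : ¬ ((m : Int) < 0) := by omega
  rw [dif_neg hz, dif_neg hneg]
  simp only [pvMod_eq]
  have hmod : PySem.Int.mod (m : Int) 2 = ((m % 2 : Nat) : Int) := by
    exact_mod_cast PySem.Int.mod_natCast m 2
  have hdiv : PySem.Int.floordiv (m : Int) 2 = ((m / 2 : Nat) : Int) := by
    exact_mod_cast PySem.Int.floordiv_natCast m 2
  by_cases hpar : m % 2 = 0
  · -- even, m = 2k with k ≥ 1
    rw [if_pos (by rw [← pvMod_eq, hmod, hpar]; rfl)]
    obtain ⟨k, hk⟩ : ∃ k, m = 2 * k := ⟨m / 2, by omega⟩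
    have hk1 : 1 ≤ k := by omega
    rw [hdiv, show m / 2 = k by omega, ih k (by omega) _ _ hk1]
    have e1 : (Int.fmod (a * a) L) ^ k ≡ a ^ m [ZMOD L] := by
      calc (Int.fmod (a * a) L) ^ k ≡ (a * a) ^ k [ZMOD L] := (pvFmod_modeq _ _).pow k
        _ = a ^ m := by rw [hk, two_mul, pow_add, mul_pow]
    have e2 : Int.fmod (a * b + b) L * pvGeom (Int.fmod (a * a) L) k
        ≡ b * pvGeom a m [ZMOD L] := by
      calc Int.fmod (a * b + b) L * pvGeom (Int.fmod (a * a) L) k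
          ≡ (a * b + b) * pvGeom (a * a) k [ZMOD L] :=
            (pvFmod_modeq _ _).mul (pvGeom_modeq (pvFmod_modeq _ _) k)
        _ = b * pvGeom a m := by rw [hk, pvGeom_two_mul]; ring
    rw [pvFmod_congr e1, pvFmod_congr e2]
  · -- odd, recurse on m - 1
    rw [if_neg (by rw [← pvMod_eq, hmod]; omega)]
    obtain ⟨p, hp⟩ : ∃ p, m = p + 1 := ⟨m - 1, by omega⟩
    have hcast : (m : Int) - 1 = ((p : Nat) : Int) := by omega
    rw [hcast]
    by_cases hp0 : p = 0
    · subst hp0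
      have h0 : polypow a b ((0 : Nat) : Int) L = (1, 0) := by rw [polypow]; norm_num
      rw [h0]
      subst hp
      simp [pvGeom]
    · have ihp := ih p (by omega) a b (by omega)
      rw [ihp]
      have e1 : a * Int.fmod (a ^ p) L ≡ a ^ m [ZMOD L] := by
        calc a * Int.fmod (a ^ p) L ≡ a * a ^ p [ZMOD L] := (Int.ModEq.refl a).mul (pvFmod_modeq _ _)
          _ = a ^ m := by rw [hp, pow_succ]; ring
      have e2 : a * Int.fmod (b * pvGeom a p) L + b ≡ b * pvGeom a m [ZMOD L] := by
        calc a * Int.fmod (b * pvGeom a p) L + b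
            ≡ a * (b * pvGeom a p) + b [ZMOD L] :=
              ((Int.ModEq.refl a).mul (pvFmod_modeq _ _)).add (Int.ModEq.refl b)
          _ = b * pvGeom a m := by rw [hp, pvGeom_succ']; ring
      rw [pvFmod_congr e1, pvFmod_congr e2]

-- closed form of B's loop for n ≥ 1
theorem polypowAltGo_closed (L : Int) (m : Nat) (rc rd ca cb : Int) (hm : 1 ≤ m) :
    polypowAltGo rc rd ca cb (m : Int) L =
      (Int.fmod (ca ^ m * rc) L, Int.fmod (ca ^ m * rd + cb * pvGeom ca m) L) := by
  induction m using Nat.strong_induction_on generalizing rc rd ca cb with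
  | _ m ih =>
  rw [polypowAltGo]
  have hpos : ((m : Int) > 0) := by exact_mod_cast hm
  rw [dif_pos hpos]
  simp only [pvMod_eq]
  have hmod : PySem.Int.mod (m : Int) 2 = ((m % 2 : Nat) : Int) := by
    exact_mod_cast PySem.Int.mod_natCast m 2
  have hdiv : PySem.Int.floordiv (m : Int) 2 = ((m / 2 : Nat) : Int) := by
    exact_mod_cast PySem.Int.floordiv_natCast m 2
  by_cases hk0 : m / 2 = 0
  · -- m = 1: last iteration, then the loop exits
    have hm1 : m = 1 := by omega
    subst hm1
    rw [if_pos (by rw [← pvMod_eq, hmod]; rfl), if_pos (by rw [← pvMod_eq, hmod]; rfl), hdiv]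
    rw [show ((1 / 2 : Nat) : Int) = ((0 : Nat) : Int) by norm_num, polypowAltGo]
    rw [dif_neg (by omega)]
    simp [pvGeom]
  · rw [hdiv, ih (m / 2) (by omega) _ _ _ _ (by omega)]
    by_cases hpar : m % 2 = 0
    · -- even step, m = 2k
      rw [if_neg (by rw [← pvMod_eq, hmod, hpar]; decide), if_neg (by rw [← pvMod_eq, hmod, hpar]; decide)]
      obtain ⟨k, hk⟩ : ∃ k, m = 2 * k := ⟨m / 2, by omega⟩
      rw [show m / 2 = k by omega]
      have e1 : Int.fmod (ca * ca) L ^ k * rc ≡ ca ^ m * rc [ZMOD L] := by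
        calc Int.fmod (ca * ca) L ^ k * rc ≡ (ca * ca) ^ k * rc [ZMOD L] :=
            ((pvFmod_modeq _ _).pow k).mul (Int.ModEq.refl rc)
          _ = ca ^ m * rc := by rw [hk, two_mul, pow_add, mul_pow]
      have e2 : Int.fmod (ca * ca) L ^ k * rd
            + Int.fmod (ca * cb + cb) L * pvGeom (Int.fmod (ca * ca) L) k
          ≡ ca ^ m * rd + cb * pvGeom ca m [ZMOD L] := by
        calc Int.fmod (ca * ca) L ^ k * rd
              + Int.fmod (ca * cb + cb) L * pvGeom (Int.fmod (ca * ca) L) k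
            ≡ (ca * ca) ^ k * rd + (ca * cb + cb) * pvGeom (ca * ca) k [ZMOD L] :=
              (((pvFmod_modeq _ _).pow k).mul (Int.ModEq.refl rd)).add
                ((pvFmod_modeq _ _).mul (pvGeom_modeq (pvFmod_modeq _ _) k))
          _ = ca ^ m * rd + cb * pvGeom ca m := by
              rw [hk, pvGeom_two_mul, two_mul, pow_add, mul_pow]; ring
      rw [pvFmod_congr e1, pvFmod_congr e2]
    · -- odd step, m = 2k + 1 with k ≥ 1
      rw [if_pos (by rw [← pvMod_eq, hmod]; omega), if_pos (by rw [← pvMod_eq, hmod]; omega)]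
      obtain ⟨k, hk⟩ : ∃ k, m = 2 * k + 1 := ⟨m / 2, by omega⟩
      rw [show m / 2 = k by omega]
      have hsq : (ca * ca) ^ k = ca ^ (2 * k) := by rw [two_mul, pow_add, mul_pow]
      have e1 : Int.fmod (ca * ca) L ^ k * Int.fmod (ca * rc) L ≡ ca ^ m * rc [ZMOD L] := by
        calc Int.fmod (ca * ca) L ^ k * Int.fmod (ca * rc) L
            ≡ (ca * ca) ^ k * (ca * rc) [ZMOD L] :=
              ((pvFmod_modeq _ _).pow k).mul (pvFmod_modeq _ _)
          _ = ca ^ m * rc := by rw [hk, hsq, pow_succ]; ring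
      have e2 : Int.fmod (ca * ca) L ^ k * Int.fmod (ca * rd + cb) L
            + Int.fmod (ca * cb + cb) L * pvGeom (Int.fmod (ca * ca) L) k
          ≡ ca ^ m * rd + cb * pvGeom ca m [ZMOD L] := by
        calc Int.fmod (ca * ca) L ^ k * Int.fmod (ca * rd + cb) L
              + Int.fmod (ca * cb + cb) L * pvGeom (Int.fmod (ca * ca) L) k
            ≡ (ca * ca) ^ k * (ca * rd + cb) + (ca * cb + cb) * pvGeom (ca * ca) k [ZMOD L] :=
              (((pvFmod_modeq _ _).pow k).mul (pvFmod_modeq _ _)).add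
                ((pvFmod_modeq _ _).mul (pvGeom_modeq (pvFmod_modeq _ _) k))
          _ = ca ^ m * rd + cb * pvGeom ca m := by
              rw [hk, pvGeom, pvGeom_two_mul, hsq, pow_succ]; ring
      rw [pvFmod_congr e1, pvFmod_congr e2]

-- ===== VERDICT (by name: the statement is the Claim_ definition above) =====
theorem polypow_spec : Claim_equal_polypow := by
  intro a b u L _ hpre
  unfold Spec_polypow polypow_alt
  obtain ⟨m, rfl⟩ : ∃ m : Nat, u = (m : Int) := ⟨u.toNat, (Int.toNat_of_nonneg hpre.1).symm⟩
  by_cases hm : m = 0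
  · subst hm
    rw [polypow, polypowAltGo]
    norm_num
  · rw [polypow_closed L m a b (by omega), polypowAltGo_closed L m 1 0 a b (by omega)]
    simp
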